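-- pv_equiv track=rewrite | github.com/hardeepsinghdot/job-hawk | main.py | degree_level
-- ===== SOURCE A (Python) =====
-- def degree_level(text: str) -> int:
--     """
--     0 = none detected,
--     1 = associate / diploma,
--     2 = bachelor's,
--     3 = master's / mba,
--     4 = phd / doctorate
--     """
--     t = text.lower()
--     level = 0
--
--     if any(k in t for k in ["phd", "doctorate", "dphil"]):
--         level = max(level, 4)
--     if any(k in t for k in ["master", "msc", "m.s.", "m.s ", "mtech", "m.tech", "mba"]):
--         level = max(level, 3)
--     if any(k in t for k in ["bachelor", "bsc", "b.s.", "b.s ", "btech", "b.tech", "b.e."]):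
--         level = max(level, 2)
--     if any(k in t for k in ["associate", "diploma"]):
--         level = max(level, 1)
--
--     return level
-- ===== SOURCE B (Python) =====
-- _KW = {"phd": 4, "doctorate": 4, "dphil": 4,
--        "master": 3, "msc": 3, "m.s.": 3, "m.s ": 3, "mtech": 3, "m.tech": 3, "mba": 3,
--        "bachelor": 2, "bsc": 2, "b.s.": 2, "b.s ": 2, "btech": 2, "b.tech": 2, "b.e.": 2,
--        "associate": 1, "diploma": 1}
--
-- def degree_level(text: str) -> int:
--     # Single left-to-right pass over the text positions: at each position,
--     # check which keywords start there (prefix test) and keep the maximum level.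
--     t = text.lower()
--     best = 0
--     for i in range(len(t)):
--         for k, lvl in _KW.items():
--             if lvl > best and t.startswith(k, i):
--                 best = lvl
--     return best
-- ===== Notes on version B (the rewrite author's own statement) =====
-- stated objective: alternative
-- what changed: A runs a separate whole-text substring search for each keyword in four max-accumulating if-blocks; B makes a single left-to-right pass over the text positions, testing at each position which keywords of a keyword-to-level map start there and keeping the maximum level.
import Mathlib
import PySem

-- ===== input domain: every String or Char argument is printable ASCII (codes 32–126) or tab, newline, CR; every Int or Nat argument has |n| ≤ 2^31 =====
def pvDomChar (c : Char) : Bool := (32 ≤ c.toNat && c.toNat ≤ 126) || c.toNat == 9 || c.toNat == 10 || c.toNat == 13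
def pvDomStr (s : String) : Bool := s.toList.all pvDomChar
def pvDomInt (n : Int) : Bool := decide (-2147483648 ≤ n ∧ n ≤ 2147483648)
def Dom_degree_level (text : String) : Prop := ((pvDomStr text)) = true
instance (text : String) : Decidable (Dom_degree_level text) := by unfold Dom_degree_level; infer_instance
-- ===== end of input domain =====

-- B replaces A's per-keyword substring scans (four max-accumulating any-blocks) by a single
-- left-to-right pass over text positions with prefix tests against a keyword→level map (objective: alternative).


-- ===== PORT A =====
def degree_level (text : String) : Int :=
  let t := PySem.Str.lower text
  let level : Int := 0
  let level := if ["phd", "doctorate", "dphil"].any (fun k => PySem.Str.isIn k t)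
               then max level 4 else level
  let level := if ["master", "msc", "m.s.", "m.s ", "mtech", "m.tech", "mba"].any (fun k => PySem.Str.isIn k t)
               then max level 3 else level
  let level := if ["bachelor", "bsc", "b.s.", "b.s ", "btech", "b.tech", "b.e."].any (fun k => PySem.Str.isIn k t)
               then max level 2 else level
  let level := if ["associate", "diploma"].any (fun k => PySem.Str.isIn k t)
               then max level 1 else level
  level

-- ===== PORT B =====
-- the module-level keyword → level dict of Source B (association list, insertion order)
def dlKW : List (String × Int) :=
  [("phd", 4), ("doctorate", 4), ("dphil", 4),
   ("master", 3), ("msc", 3), ("m.s.", 3), ("m.s ", 3), ("mtech", 3), ("m.tech", 3), ("mba", 3),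
   ("bachelor", 2), ("bsc", 2), ("b.s.", 2), ("b.s ", 2), ("btech", 2), ("b.tech", 2), ("b.e.", 2),
   ("associate", 1), ("diploma", 1)]

-- t.startswith(k, i) with 0 ≤ i is exactly a prefix test on t[i:] (exact port by hand via drop)
def degree_level_alt (text : String) : Int :=
  let t := PySem.Str.lower text
  (PySem.List.pyRange 0 (PySem.Str.len t) 1).foldl
    (fun best i => dlKW.foldl
      (fun b kl =>
        if kl.2 > b && PySem.Chars.startswith (t.toList.drop i.toNat) kl.1.toList then kl.2 else b)
      best)
    0

-- ===== PRECONDITION & SPEC =====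
def Spec_degree_level (text : String) (out : Int) : Prop := out = degree_level_alt text
instance (text : String) (out : Int) : Decidable (Spec_degree_level text out) := by unfold Spec_degree_level; infer_instance

-- ===== CLAIM (what is proved, stated in full; the proofs are below) =====
def Claim_equal_degree_level : Prop := ∀ (text : String), Dom_degree_level text → Spec_degree_level text (degree_level text)

-- ===== LEMMAS AND PROOFS =====

-- all position/keyword pairs B's double loop visits, flattened
def dlPairs (s : List Char) : List (Int × String × Int) :=
  (PySem.List.pyRange 0 (s.length : Int) 1).flatMap (fun i => dlKW.map (fun kl => (i, kl)))

def dlMatch (s : List Char) (x : Int × String × Int) : Bool :=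
  PySem.Chars.startswith (s.drop x.1.toNat) x.2.1.toList

def dlStep (s : List Char) (b : Int) (x : Int × String × Int) : Int :=
  if x.2.2 > b && dlMatch s x then x.2.2 else b

-- "some keyword of this list matches at some scanned position of s"
def dlHitB (s : List Char) (kws : List String) : Bool :=
  kws.any (fun k => (PySem.List.pyRange 0 (s.length : Int) 1).any
    (fun i => PySem.Chars.startswith (s.drop i.toNat) k.toList))

lemma dl_hitB_iff (s : List Char) (kws : List String) :
    dlHitB s kws = true ↔
      ∃ k ∈ kws, ∃ i ∈ PySem.List.pyRange 0 (s.length : Int) 1,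
        PySem.Chars.startswith (s.drop i.toNat) k.toList = true := by
  simp [dlHitB, List.any_eq_true]

lemma dl_b_eq_pairs (text : String) :
    degree_level_alt text
      = (dlPairs (PySem.Str.lower text).toList).foldl
          (dlStep (PySem.Str.lower text).toList) 0 := by
  simp only [degree_level_alt, dlPairs, dlStep, dlMatch, List.foldl_flatMap, List.foldl_map,
    PySem.Str.len_eq]

-- guarded-max fold: the accumulator never decreases
lemma dl_foldl_le (s : List Char) (l : List (Int × String × Int)) (b : Int) :
    b ≤ l.foldl (dlStep s) b := by
  induction l generalizing b with
  | nil => simp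
  | cons hd tl ih =>
      refine le_trans ?_ (ih (dlStep s b hd))
      simp only [dlStep]
      split
      · simp_all; omega
      · exact le_refl b

-- every matched level is a lower bound for the fold's result
lemma dl_foldl_ub (s : List Char) (x : Int × String × Int) (hm : dlMatch s x = true) :
    ∀ (l : List (Int × String × Int)), x ∈ l → ∀ (b : Int),
      x.2.2 ≤ l.foldl (dlStep s) b := by
  intro l
  induction l with
  | nil => intro hx; simp at hx
  | cons hd tl ih =>
      intro hx b
      rcases List.mem_cons.mp hx with h | h
      · subst h
        refine le_trans ?_ (dl_foldl_le s tl (dlStep s b x))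
        simp only [dlStep, hm]
        split
        · exact le_refl _
        · simp_all
      · exact ih h _

-- the fold's result is the start value or a matched element's level
lemma dl_foldl_attained (s : List Char) (l : List (Int × String × Int)) (b : Int) :
    l.foldl (dlStep s) b = b ∨
      ∃ x ∈ l, dlMatch s x = true ∧ l.foldl (dlStep s) b = x.2.2 := by
  induction l generalizing b with
  | nil => simp
  | cons hd tl ih =>
      rw [List.foldl_cons]
      rcases ih (dlStep s b hd) with h | ⟨x, hx, hm, hv⟩
      · rw [h]
        simp only [dlStep]
        by_cases hc : (decide (hd.2.2 > b) && dlMatch s hd) = true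
        · rw [if_pos hc]
          have hc' := hc
          simp only [Bool.and_eq_true] at hc'
          exact Or.inr ⟨hd, List.mem_cons_self, hc'.2, rfl⟩
        · rw [if_neg hc]
          exact Or.inl rfl
      · exact Or.inr ⟨x, List.mem_cons_of_mem _ hx, hm, hv⟩

-- membership in the flattened pair list
lemma dl_mem_pairs (s : List Char) (x : Int × String × Int) :
    x ∈ dlPairs s ↔
      (x.1 ∈ PySem.List.pyRange 0 (s.length : Int) 1 ∧ x.2 ∈ dlKW) := by
  simp only [dlPairs, List.mem_flatMap, List.mem_map]
  constructor
  · rintro ⟨i, hi, kl, hkl, rfl⟩; exact ⟨hi, hkl⟩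
  · rintro ⟨hi, hkl⟩; exact ⟨x.1, hi, x.2, hkl, rfl⟩

-- B's fold equals the high-to-low decision on the four hit conditions
lemma dl_b_characterize (s : List Char) :
    (dlPairs s).foldl (dlStep s) 0 =
      if dlHitB s ["phd", "doctorate", "dphil"] then 4
      else if dlHitB s ["master", "msc", "m.s.", "m.s ", "mtech", "m.tech", "mba"] then 3
      else if dlHitB s ["bachelor", "bsc", "b.s.", "b.s ", "btech", "b.tech", "b.e."] then 2
      else if dlHitB s ["associate", "diploma"] then 1
      else 0 := by
  have hlevels : ∀ kl ∈ dlKW, (1:Int) ≤ kl.2 ∧ kl.2 ≤ 4 := by decide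
  have hgroup : ∀ kl ∈ dlKW,
      (kl.2 = 4 → kl.1 ∈ ["phd", "doctorate", "dphil"]) ∧
      (kl.2 = 3 → kl.1 ∈ ["master", "msc", "m.s.", "m.s ", "mtech", "m.tech", "mba"]) ∧
      (kl.2 = 2 → kl.1 ∈ ["bachelor", "bsc", "b.s.", "b.s ", "btech", "b.tech", "b.e."]) ∧
      (kl.2 = 1 → kl.1 ∈ ["associate", "diploma"]) := by decide
  have hmem4 : ∀ k ∈ ["phd", "doctorate", "dphil"], (k, (4:Int)) ∈ dlKW := by decide
  have hmem3 : ∀ k ∈ ["master", "msc", "m.s.", "m.s ", "mtech", "m.tech", "mba"],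
      (k, (3:Int)) ∈ dlKW := by decide
  have hmem2 : ∀ k ∈ ["bachelor", "bsc", "b.s.", "b.s ", "btech", "b.tech", "b.e."],
      (k, (2:Int)) ∈ dlKW := by decide
  have hmem1 : ∀ k ∈ ["associate", "diploma"], (k, (1:Int)) ∈ dlKW := by decide
  set r := (dlPairs s).foldl (dlStep s) 0 with hrdef
  -- a hit of level v bounds r from below
  have hlb : ∀ (kws : List String) (v : Int), (∀ k ∈ kws, (k, v) ∈ dlKW) →
      dlHitB s kws = true → v ≤ r := by
    intro kws v hkv hb
    obtain ⟨k, hk, i, hi, hsw⟩ := (dl_hitB_iff s kws).mp hb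
    have hx : ((i, k, v) : Int × String × Int) ∈ dlPairs s :=
      (dl_mem_pairs s (i, k, v)).mpr ⟨hi, hkv k hk⟩
    exact dl_foldl_ub s (i, k, v) (by simpa [dlMatch] using hsw) _ hx 0
  have hcases := dl_foldl_attained s (dlPairs s) 0
  rw [← hrdef] at hcases
  -- bounds on r
  have hbound : r = 0 ∨ (1 ≤ r ∧ r ≤ 4) := by
    rcases hcases with h | ⟨x, hx, _, hv⟩
    · exact Or.inl h
    · obtain ⟨_, hkl⟩ := (dl_mem_pairs s x).mp hx
      have := hlevels x.2 hkl
      omega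
  -- a missed group excludes its level
  have hmiss : ∀ (kws : List String) (v : Int),
      (∀ kl ∈ dlKW, kl.2 = v → kl.1 ∈ kws) → (1:Int) ≤ v → dlHitB s kws ≠ true → r ≠ v := by
    intro kws v hkv hv1 hb hrv
    rcases hcases with h | ⟨x, hx, hm, hv⟩
    · omega
    · obtain ⟨hi, hkl⟩ := (dl_mem_pairs s x).mp hx
      apply hb
      apply (dl_hitB_iff s kws).mpr
      refine ⟨x.2.1, hkv x.2 hkl (by omega), x.1, hi, by simpa [dlMatch] using hm⟩
  by_cases h4 : dlHitB s ["phd", "doctorate", "dphil"] = true <;>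
  by_cases h3 : dlHitB s ["master", "msc", "m.s.", "m.s ", "mtech", "m.tech", "mba"] = true <;>
  by_cases h2 : dlHitB s ["bachelor", "bsc", "b.s.", "b.s ", "btech", "b.tech", "b.e."] = true <;>
  by_cases h1 : dlHitB s ["associate", "diploma"] = true <;>

  (try have a4 := hlb _ 4 hmem4 h4) <;>
  (try have a3 := hlb _ 3 hmem3 h3) <;>
  (try have a2 := hlb _ 2 hmem2 h2) <;>
  (try have a1 := hlb _ 1 hmem1 h1) <;>
  (try have b4 := hmiss _ 4 (fun kl hm hv => (hgroup kl hm).1 hv) (by norm_num) h4) <;>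
  (try have b3 := hmiss _ 3 (fun kl hm hv => (hgroup kl hm).2.1 hv) (by norm_num) h3) <;>
  (try have b2 := hmiss _ 2 (fun kl hm hv => (hgroup kl hm).2.2.1 hv) (by norm_num) h2) <;>
  (try have b1 := hmiss _ 1 (fun kl hm hv => (hgroup kl hm).2.2.2 hv) (by norm_num) h1) <;>
  simp only [h4, h3, h2, h1, Bool.false_eq_true, if_true, if_false] <;>
  omega


-- a nonempty keyword occurs as a prefix at some scanned position iff it is a substring
lemma dl_pos_iff_isIn (s k : List Char) (hk : k ≠ []) :
    (∃ i ∈ PySem.List.pyRange 0 (s.length : Int) 1,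
        PySem.Chars.startswith (s.drop i.toNat) k = true) ↔
      PySem.Chars.isIn k s = true := by
  rw [← PySem.Chars.exists_prefix_drop_iff_isIn]
  constructor
  · rintro ⟨i, _, hsw⟩
    exact ⟨i.toNat, (PySem.Chars.startswith_iff _ _).mp hsw⟩
  · rintro ⟨j, hpre⟩
    have hne : s.drop j ≠ [] := by
      intro hnil; rw [hnil] at hpre
      exact hk (List.prefix_nil.mp hpre)
    have hj : j < s.length := by
      by_contra hge
      exact hne (List.drop_eq_nil_iff.mpr (by omega))
    refine ⟨(j : Int), (PySem.List.mem_pyRange_one).mpr (by omega), ?_⟩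
    simpa using (PySem.Chars.startswith_iff _ _).mpr hpre

-- a group hit is exactly A's `any(k in t …)` condition, for groups of nonempty keywords
lemma dl_hitB_eq_any (t : String) (kws : List String) (hk : ∀ k ∈ kws, k.toList ≠ []) :
    dlHitB t.toList kws = kws.any (fun k => PySem.Str.isIn k t) := by
  rcases hb : kws.any (fun k => PySem.Str.isIn k t) with _ | _
  · rw [← Bool.not_eq_true] at hb ⊢
    intro hhit
    obtain ⟨k, hkm, hpos⟩ := (dl_hitB_iff _ _).mp hhit
    apply hb
    rw [List.any_eq_true]
    refine ⟨k, hkm, ?_⟩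
    rw [PySem.Str.isIn_iff_infix, ← PySem.Chars.isIn_iff_infix]
    exact (dl_pos_iff_isIn t.toList k.toList (hk k hkm)).mp ⟨hpos.choose, hpos.choose_spec⟩
  · obtain ⟨k, hkm, hin⟩ := List.any_eq_true.mp hb
    apply (dl_hitB_iff _ _).mpr
    refine ⟨k, hkm, ?_⟩
    rw [PySem.Str.isIn_iff_infix, ← PySem.Chars.isIn_iff_infix] at hin
    exact (dl_pos_iff_isIn t.toList k.toList (hk k hkm)).mpr hin

-- ===== VERDICT (by name: the statement is the Claim_ definition above) =====
theorem degree_level_spec : Claim_equal_degree_level := by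
  intro text _
  unfold Spec_degree_level
  rw [dl_b_eq_pairs, dl_b_characterize]
  rw [dl_hitB_eq_any _ _ (by decide), dl_hitB_eq_any _ _ (by decide),
    dl_hitB_eq_any _ _ (by decide), dl_hitB_eq_any _ _ (by decide)]
  simp only [degree_level]
  set t := PySem.Str.lower text with ht
  by_cases h4 : (["phd", "doctorate", "dphil"].any fun k => PySem.Str.isIn k t) = true <;>
  by_cases h3 : (["master", "msc", "m.s.", "m.s ", "mtech", "m.tech", "mba"].any
      fun k => PySem.Str.isIn k t) = true <;>
  by_cases h2 : (["bachelor", "bsc", "b.s.", "b.s ", "btech", "b.tech", "b.e."].any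
      fun k => PySem.Str.isIn k t) = true <;>
  by_cases h1 : (["associate", "diploma"].any fun k => PySem.Str.isIn k t) = true <;>
  simp only [h4, h3, h2, h1, Bool.false_eq_true, if_true, if_false] <;>
  norm_num
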